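-- pv_equiv track=rewrite | github.com/Balrog57/recyclarr-configurator | templates_extractor.py | _extract_description_from_comments
-- ===== SOURCE A (Python) =====
-- def _extract_description_from_comments(raw_content: str) -> str:
--     """Extract description from YAML comments."""
--     lines = raw_content.split("\n")
--     description_lines = []
--
--     for line in lines:
--         if line.startswith("#"):
--             comment_text = line.lstrip("# ").strip()
--             if comment_text and not comment_text.startswith(("Updated:", "Documentation:")):
--                 description_lines.append(comment_text)
--         elif line.strip() and not line.startswith("#"):
--             break
--
--     return " ".join(description_lines[:3]) if description_lines else ""
-- ===== SOURCE B (Python) =====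
-- def _extract_description_from_comments(raw_content: str) -> str:
--     """Extract description from YAML comments.
--
--     Character-stream state machine: scans the raw text once, buffering the
--     current line; never materializes the list of lines (no split)."""
--     parts = []
--     buf = ""
--     for ch in raw_content + "\n":
--         if ch != "\n":
--             buf += ch
--             continue
--         line, buf = buf, ""
--         if line.startswith("#"):
--             text = line.lstrip("# ").strip()
--             if text and not text.startswith(("Updated:", "Documentation:")):
--                 parts.append(text)
--         elif line.strip():
--             break
--     return " ".join(parts[:3])
-- ===== Notes on version B (the rewrite author's own statement) =====
-- stated objective: alternative
-- what changed: Replaced A's split-into-lines-then-loop design with a single character-stream state machine that buffers the current line, processes it at each newline and stops at the first non-blank non-comment line, never materializing the line list.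
import Mathlib
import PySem

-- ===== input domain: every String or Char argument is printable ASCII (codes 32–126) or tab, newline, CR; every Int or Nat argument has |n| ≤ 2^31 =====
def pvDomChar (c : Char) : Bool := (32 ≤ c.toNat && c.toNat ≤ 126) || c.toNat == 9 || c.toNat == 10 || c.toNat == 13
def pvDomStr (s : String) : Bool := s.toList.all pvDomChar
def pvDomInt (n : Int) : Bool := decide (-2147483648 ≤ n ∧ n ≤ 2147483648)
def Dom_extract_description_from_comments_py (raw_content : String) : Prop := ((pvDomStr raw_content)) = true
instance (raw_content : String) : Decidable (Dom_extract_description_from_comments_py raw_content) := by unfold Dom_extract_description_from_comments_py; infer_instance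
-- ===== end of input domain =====

-- B replaces A's split-into-lines-then-loop design by a single character-stream state
-- machine (line buffer, processed at each newline, stop at the first code line);
-- alternative decomposition, same asymptotic cost.

-- ===== PORT A =====
-- line.lstrip("# ").strip()  (lstrip with a char set, ported by hand as dropWhile; exact on ASCII)
def pvCleanLine (line : List Char) : List Char :=
  PySem.Chars.strip (line.dropWhile (fun c => c == '#' || c == ' '))

-- the for-loop of A: accumulates description_lines, breaks at the first non-blank non-comment line
def pvA_loop : List (List Char) → List (List Char) → List (List Char)
  | [], acc => acc
  | line :: rest, acc =>
    if PySem.Chars.startswith line ['#'] then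
      let t := pvCleanLine line
      if t ≠ [] ∧ ¬ (PySem.Chars.startswith t "Updated:".toList = true
                      ∨ PySem.Chars.startswith t "Documentation:".toList = true) then
        pvA_loop rest (acc ++ [t])
      else
        pvA_loop rest acc
    else if PySem.Chars.strip line ≠ [] ∧ ¬ PySem.Chars.startswith line ['#'] = true then
      acc  -- break
    else
      pvA_loop rest acc

def extract_description_from_comments_py (raw_content : String) : String :=
  let lines := PySem.Chars.splitOn raw_content.toList ['\n']
  let description_lines := pvA_loop lines []
  if description_lines = [] then ""
  else String.mk (PySem.Chars.join [' '] (description_lines.take 3))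

-- ===== PORT B =====
-- the char-stream loop of B: buf is the current line buffer, parts the collected texts
def pvB_chars : List Char → List Char → List (List Char) → List (List Char)
  | [], _, parts => parts
  | ch :: rest, buf, parts =>
    if ch ≠ '\n' then pvB_chars rest (buf ++ [ch]) parts
    else
      if PySem.Chars.startswith buf ['#'] then
        let text := PySem.Chars.strip (buf.dropWhile (fun c => c == '#' || c == ' '))
        if text ≠ [] ∧ ¬ (PySem.Chars.startswith text "Updated:".toList = true
                           ∨ PySem.Chars.startswith text "Documentation:".toList = true) then
          pvB_chars rest [] (parts ++ [text])
        else
          pvB_chars rest [] parts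
      else if PySem.Chars.strip buf ≠ [] then
        parts  -- break
      else
        pvB_chars rest [] parts

def extract_description_from_comments_py_alt (raw_content : String) : String :=
  let parts := pvB_chars (raw_content.toList ++ ['\n']) [] []
  String.mk (PySem.Chars.join [' '] (parts.take 3))

-- ===== PRECONDITION & SPEC =====
def Spec_extract_description_from_comments_py (raw_content : String) (out : String) : Prop := out = extract_description_from_comments_py_alt raw_content
instance (raw_content : String) (out : String) : Decidable (Spec_extract_description_from_comments_py raw_content out) := by unfold Spec_extract_description_from_comments_py; infer_instance

-- ===== CLAIM =====
def Claim_equal_extract_description_from_comments_py : Prop := ∀ (raw_content : String), Dom_extract_description_from_comments_py raw_content → Spec_extract_description_from_comments_py raw_content (extract_description_from_comments_py raw_content)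

-- ===== LEMMAS AND PROOFS =====

-- a simple structural split on '\n' (proof-side characterisation of PySem.Chars.splitOn)
def pvNlSplit : List Char → List (List Char)
  | [] => [[]]
  | c :: rest =>
    if c = '\n' then [] :: pvNlSplit rest
    else
      match pvNlSplit rest with
      | [] => [[c]]
      | p :: ps => (c :: p) :: ps

theorem pvNlSplit_ne_nil (l : List Char) : pvNlSplit l ≠ [] := by
  cases l with
  | nil => simp [pvNlSplit]
  | cons c rest =>
    unfold pvNlSplit
    split_ifs
    · simp
    · cases h : pvNlSplit rest <;> simp

theorem pv_go_spec (fuel : Nat) (l cur : List Char) (acc : List (List Char))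
    (hf : l.length ≤ fuel) :
    PySem.Chars.splitOn.go ['\n'] fuel l cur acc =
      acc.reverse ++ ((pvNlSplit l).modifyHead (cur.reverse ++ ·)) := by
  induction fuel generalizing l cur acc with
  | zero =>
    interval_cases hl : l.length
    · have : l = [] := List.length_eq_zero_iff.mp hl
      subst this
      simp [PySem.Chars.splitOn.go, pvNlSplit]
  | succ fuel ih =>
    cases l with
    | nil => simp [PySem.Chars.splitOn.go, pvNlSplit]
    | cons c rest =>
      rw [PySem.Chars.splitOn.go]
      by_cases hc : c = '\n'
      · subst hc
        rw [if_pos (by simp [List.isPrefixOf])]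
        simp only [List.length_cons, List.length_nil, Nat.zero_add, List.drop_succ_cons, List.drop_zero]
        rw [ih rest [] (cur.reverse :: acc) (by simpa using Nat.le_of_succ_le_succ hf)]
        simp only [pvNlSplit, if_true]
        cases pvNlSplit rest <;> simp
      · rw [if_neg (by simp [List.isPrefixOf, Ne.symm hc])]
        rw [ih rest (c :: cur) acc (by simpa using Nat.le_of_succ_le_succ hf)]
        cases h : pvNlSplit rest with
        | nil => exact absurd h (pvNlSplit_ne_nil rest)
        | cons p ps =>
          have hcr : pvNlSplit (c :: rest) = (c :: p) :: ps := by
            rw [pvNlSplit, if_neg hc, h]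
          rw [hcr]; simp

theorem pv_splitOn_eq_nlSplit (l : List Char) :
    PySem.Chars.splitOn l ['\n'] = pvNlSplit l := by
  unfold PySem.Chars.splitOn
  rw [pv_go_spec l.length.succ l [] [] (Nat.le_succ _)]
  cases pvNlSplit l <;> simp

theorem pvNlSplit_no_nl (buf : List Char) (h : '\n' ∉ buf) : pvNlSplit buf = [buf] := by
  induction buf with
  | nil => rfl
  | cons c rest ih =>
    simp only [List.mem_cons, not_or] at h
    unfold pvNlSplit
    rw [if_neg (Ne.symm h.1), ih h.2]

theorem pvNlSplit_append (buf rest : List Char) (h : '\n' ∉ buf) :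
    pvNlSplit (buf ++ '\n' :: rest) = buf :: pvNlSplit rest := by
  induction buf with
  | nil => simp [pvNlSplit]
  | cons c tl ih =>
    simp only [List.mem_cons, not_or] at h
    rw [List.cons_append]
    have hstep : pvNlSplit (c :: (tl ++ '\n' :: rest)) =
        match pvNlSplit (tl ++ '\n' :: rest) with
        | [] => [[c]]
        | p :: ps => (c :: p) :: ps := by
      rw [pvNlSplit, if_neg (Ne.symm h.1)]
    rw [hstep, ih h.2]

-- B's char loop computes exactly A's line loop over the '\n'-split of buf ++ cs
theorem pvB_chars_eq (cs : List Char) : ∀ (buf : List Char) (parts : List (List Char)),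
    '\n' ∉ buf →
    pvB_chars (cs ++ ['\n']) buf parts = pvA_loop (pvNlSplit (buf ++ cs)) parts := by
  induction cs with
  | nil =>
    intro buf parts h
    simp only [List.nil_append, List.append_nil]
    rw [pvNlSplit_no_nl buf h]
    simp only [pvB_chars, pvA_loop]
    split_ifs with h1 h2 <;> simp_all [pvCleanLine]
  | cons c rest ih =>
    intro buf parts h
    by_cases hc : c = '\n'
    · subst hc
      have : buf ++ '\n' :: rest = buf ++ '\n' :: rest := rfl
      rw [pvNlSplit_append buf rest h]
      simp only [List.cons_append, pvB_chars, pvA_loop, if_neg (by simp : ¬('\n' ≠ '\n'))]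
      split_ifs with h1 h2 <;>
        simp_all [pvCleanLine, ih [] _ (by simp)]
    · simp only [List.cons_append]
      rw [show pvB_chars (c :: (rest ++ ['\n'])) buf parts
            = pvB_chars (rest ++ ['\n']) (buf ++ [c]) parts by
          simp [pvB_chars, hc]]
      rw [ih (buf ++ [c]) parts (by simp [h, Ne.symm hc])]
      rw [show buf ++ [c] ++ rest = buf ++ c :: rest by simp]

-- ===== VERDICT =====
theorem extract_description_from_comments_py_spec : Claim_equal_extract_description_from_comments_py := by
  intro raw_content _
  unfold Spec_extract_description_from_comments_py
  unfold extract_description_from_comments_py extract_description_from_comments_py_alt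
  rw [pv_splitOn_eq_nlSplit]
  rw [pvB_chars_eq raw_content.toList [] [] (by simp)]
  simp only [List.nil_append]
  by_cases h : pvA_loop (pvNlSplit raw_content.toList) [] = []
  · rw [if_pos h, h]
    rfl
  · rw [if_neg h]
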